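-- pv_equiv track=rewrite | github.com/pypi-data/pypi-mirror-402 | packages/tson/tson-1.1.0-py3-none-any.whl/tson/utils.py | is_uniform_object_array
-- ===== SOURCE A (Python) =====
-- from typing import Any, List, Dict, Optional
--
-- def is_uniform_object_array(data: List) -> bool:
--     """
--     Check if a list is an array of objects with identical keys.
--
--     This determines if we can use tabular format optimization.
--
--     Args:
--         data: List to check
--
--     Returns:
--         True if list contains uniform objects, False otherwise
--     """
--     if not isinstance(data, list) or len(data) == 0:
--         return False
--
--     # All elements must be dictionaries
--     if not all(isinstance(item, dict) for item in data):
--         return False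
--
--     # Get keys from first element
--     first_keys = list(data[0].keys())
--
--     # Check that all elements have the same keys in the same order
--     for item in data[1:]:
--         if list(item.keys()) != first_keys:
--             return False
--
--     return True
-- ===== SOURCE B (Python) =====
-- def is_uniform_object_array(data) -> bool:
--     if not isinstance(data, list) or len(data) == 0:
--         return False
--     if not all(isinstance(item, dict) for item in data):
--         return False
--     # collect each element's key order as a hashable signature; uniform iff one signature
--     signatures = {tuple(item.keys()) for item in data}
--     return len(signatures) == 1
-- ===== Notes on version B (the rewrite author's own statement) =====
-- stated objective: idiomatic
-- what changed: Replaces the reference-keys-and-loop comparison against data[0] with a set comprehension collecting every element's key-order tuple and testing that exactly one signature exists.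
import Mathlib
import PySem

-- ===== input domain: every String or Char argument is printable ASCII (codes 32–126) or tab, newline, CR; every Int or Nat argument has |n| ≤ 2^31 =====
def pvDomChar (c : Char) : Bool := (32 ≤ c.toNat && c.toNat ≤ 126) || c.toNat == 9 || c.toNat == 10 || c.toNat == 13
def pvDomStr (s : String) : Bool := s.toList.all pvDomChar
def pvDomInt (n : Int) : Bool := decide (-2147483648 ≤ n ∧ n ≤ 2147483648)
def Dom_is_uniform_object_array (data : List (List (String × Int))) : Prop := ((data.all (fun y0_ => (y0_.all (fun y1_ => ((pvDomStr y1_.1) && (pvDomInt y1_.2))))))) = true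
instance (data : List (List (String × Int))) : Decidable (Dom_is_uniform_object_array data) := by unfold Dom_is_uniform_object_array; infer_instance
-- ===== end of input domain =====

-- B is the same check written idiomatically: one set of key-order signatures instead of a loop
-- comparing each element's key list against data[0]'s; return-value equivalence only.

-- ===== PORT A =====
-- Each Python dict arrives as an association list; list(item.keys()) is (Dict.ofList item).keys.
-- The isinstance guards of A are vacuous under the typed signature (data is always a list of dicts).
def is_uniform_object_array (data : List (List (String × Int))) : Bool :=
  if data.length = 0 then false
  else
    let first_keys := (PySem.Dict.ofList (data.headD [])).keys   -- data[0], safe: data nonempty here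
    -- for item in data[1:]: if list(item.keys()) != first_keys: return False
    (PySem.List.slice data (some 1) none).all
      (fun item => (PySem.Dict.ofList item).keys == first_keys)

-- ===== PORT B =====
def is_uniform_object_array_alt (data : List (List (String × Int))) : Bool :=
  if data.length = 0 then false
  else
    let signatures : PySem.Set (List String) :=
      PySem.Set.ofList (data.map (fun item => (PySem.Dict.ofList item).keys))
    PySem.Set.len signatures == 1

-- ===== PRECONDITION & SPEC =====
def Spec_is_uniform_object_array (data : List (List (String × Int))) (out : Bool) : Prop := out = is_uniform_object_array_alt data
instance (data : List (List (String × Int))) (out : Bool) : Decidable (Spec_is_uniform_object_array data out) := by unfold Spec_is_uniform_object_array; infer_instance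

-- ===== CLAIM (what is proved, stated in full; the proofs are below) =====
def Claim_equal_is_uniform_object_array : Prop := ∀ (data : List (List (String × Int))), Dom_is_uniform_object_array data → Spec_is_uniform_object_array data (is_uniform_object_array data)

-- ===== LEMMAS AND PROOFS =====

-- set(l) has exactly one element iff every member of l equals the head x
lemma set_len_one_iff {α : Type} [BEq α] [LawfulBEq α] (x : α) (l : List α) :
    (PySem.Set.ofList (x :: l)).length = 1 ↔ ∀ y ∈ l, y = x := by
  constructor
  · intro h y hy
    have h0 : PySem.Set.discard (PySem.Set.ofList l) x = [] := by
      rw [PySem.Set.ofList_cons, List.length_cons] at h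
      exact List.length_eq_zero_iff.mp (by omega)
    by_contra hne
    have hmem : y ∈ PySem.Set.discard (PySem.Set.ofList l) x := by
      rw [PySem.Set.mem_discard]
      exact ⟨(PySem.Set.mem_ofList _ _).mpr hy, hne⟩
    rw [h0] at hmem
    exact absurd hmem (List.not_mem_nil)
  · intro h
    rw [PySem.Set.ofList_cons, List.length_cons]
    have h0 : PySem.Set.discard (PySem.Set.ofList l) x = [] := by
      rw [List.eq_nil_iff_forall_not_mem]
      intro y hy
      rw [PySem.Set.mem_discard, PySem.Set.mem_ofList] at hy
      exact hy.2 (h y hy.1)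
    rw [h0]
    rfl

-- ===== VERDICT (by name: the statement is the Claim_ definition above) =====
theorem is_uniform_object_array_spec : Claim_equal_is_uniform_object_array := by
  intro data _
  unfold Spec_is_uniform_object_array is_uniform_object_array is_uniform_object_array_alt
  cases data with
  | nil => rfl
  | cons first rest =>
    simp only [List.length_cons, Nat.succ_ne_zero, if_false, List.headD_cons]
    rw [PySem.List.slice_from (ha := by norm_num)]
    simp only [Int.toNat_one, List.drop_succ_cons, List.drop_zero, List.map_cons,
      PySem.Set.len]
    rw [Bool.eq_iff_iff]
    simp only [List.all_eq_true, beq_iff_eq, Nat.cast_eq_one,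
      set_len_one_iff, List.mem_map, forall_exists_index]
    constructor
    · rintro h y item ⟨hmem, rfl⟩
      exact h item hmem
    · intro h item hmem
      exact h _ item ⟨hmem, rfl⟩
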